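-- pv_equiv track=rewrite | github.com/readw/BTPatchChecker | Application/routerPatchChecker.py | compareAddress
-- ===== SOURCE A (Python) =====
-- def compareAddress(results):
--     ''' Compares to see if the IP addresses are identical, and removes any identical values. '''
--     uniqueAddress = []
--     for result in results:
--         unique = True
--         for compare in results:
--             # If the comparison value is the same as the result, then ignore it.
--             if (compare != result):
--                 # Checks to see if the addresses match.
--                 if (result[1] == compare[1]):
--                     unique = False
--                     break
--             continue
--         if (unique == True):
--             # Appends the result to the uniqueHost array if they are unique.
--             uniqueAddress.append(result)
--     return uniqueAddress
-- ===== SOURCE B (Python) =====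
-- def compareAddress(results):
--     ''' Compares to see if the IP addresses are identical, and removes any identical values. '''
--     # One pass: group by address; a group holds its (unique) row, or None once
--     # two differing rows share the address.  Then keep rows of clean groups.
--     groups = {}
--     for r in results:
--         a = r[1]
--         if a not in groups:
--             groups[a] = r
--         elif groups[a] != r:
--             groups[a] = None
--     return [r for r in results if groups[r[1]] == r]
-- ===== Notes on version B (the rewrite author's own statement) =====
-- stated objective: faster
-- what changed: Replaces the quadratic all-pairs comparison by a single dict pass that groups rows by address and marks groups containing two differing rows, then keeps rows whose group is clean.
-- outside the precondition, e.g. on compareAddress([['a']]): A returns [['a']], B raises IndexError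
import Mathlib
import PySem

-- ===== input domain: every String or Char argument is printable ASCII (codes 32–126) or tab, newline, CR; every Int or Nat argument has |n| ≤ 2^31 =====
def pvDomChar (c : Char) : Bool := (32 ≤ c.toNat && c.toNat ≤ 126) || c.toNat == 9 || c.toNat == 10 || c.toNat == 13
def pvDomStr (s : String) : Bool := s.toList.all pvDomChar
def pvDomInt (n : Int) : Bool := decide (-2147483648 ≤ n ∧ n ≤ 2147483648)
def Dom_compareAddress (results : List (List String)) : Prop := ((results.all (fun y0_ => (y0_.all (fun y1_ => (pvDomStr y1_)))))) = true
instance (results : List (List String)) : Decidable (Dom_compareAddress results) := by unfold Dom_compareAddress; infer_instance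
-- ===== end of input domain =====

-- B replaces A's quadratic all-pairs scan by one dict pass grouping rows by address.

-- ===== PORT A =====
-- inner 'for compare in results' loop with its break
def innerA (result : List String) : List (List String) → Bool
  | [] => true
  | compare :: rest =>
    if compare ≠ result ∧ PySem.List.pyGet? result 1 = PySem.List.pyGet? compare 1 then
      false
    else
      innerA result rest

def compareAddress (results : List (List String)) : List (List String) :=
  results.foldl (fun uniqueAddress result =>
    if innerA result results then uniqueAddress ++ [result] else uniqueAddress) []

-- ===== PORT B =====
-- r[1]; exact whenever the row has at least two entries (guaranteed by Pre_)
def addrOf (r : List String) : String := (PySem.List.pyGet? r 1).getD ""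

def buildGroups (results : List (List String)) : PySem.Dict String (Option (List String)) :=
  results.foldl (fun groups r =>
    match groups.get? (addrOf r) with
    | none => groups.insert (addrOf r) (some r)
    | some v => if v ≠ some r then groups.insert (addrOf r) none else groups)
    PySem.Dict.empty

def compareAddress_alt (results : List (List String)) : List (List String) :=
  let groups := buildGroups results
  results.filter (fun r => groups.getD (addrOf r) none = some r)

-- ===== PRECONDITION & SPEC =====
-- Pre_ excludes rows with fewer than two entries: there 'r[1]' raises IndexError
-- (A raises whenever two differing rows occur, and returns only on degenerate inputs; B always raises).
def Pre_compareAddress (results : List (List String)) : Prop :=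
  ∀ r ∈ results, 2 ≤ r.length
instance (results : List (List String)) : Decidable (Pre_compareAddress results) := by
  unfold Pre_compareAddress; infer_instance

def pvWitness_compareAddress : List (List String) :=
  [["host1", "10.0.0.1"], ["host2", "10.0.0.2"], ["host3", "10.0.0.1"]]

def Spec_compareAddress (results : List (List String)) (out : List (List String)) : Prop := out = compareAddress_alt results
instance (results : List (List String)) (out : List (List String)) : Decidable (Spec_compareAddress results out) := by unfold Spec_compareAddress; infer_instance

-- ===== CLAIM (what is proved, stated in full; the proofs are below) =====
def Claim_equal_compareAddress : Prop := ∀ (results : List (List String)), Dom_compareAddress results → Pre_compareAddress results → Spec_compareAddress results (compareAddress results)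

-- ===== LEMMAS AND PROOFS =====

-- A's output is a filter by the inner-loop predicate
theorem compareAddress_eq_filter (results : List (List String)) :
    compareAddress results = results.filter (fun r => innerA r results) := by
  simpa using PySem.List.foldl_append_if_eq_filter (fun r => innerA r results) results []

-- the inner loop decides 'no differing row shares my address slot'
theorem innerA_eq_true_iff (result : List String) (l : List (List String)) :
    innerA result l = true ↔
      ∀ c ∈ l, PySem.List.pyGet? c 1 = PySem.List.pyGet? result 1 → c = result := by
  induction l with
  | nil => simp [innerA]
  | cons c rest ih =>
    simp only [innerA]
    by_cases h : c ≠ result ∧ PySem.List.pyGet? result 1 = PySem.List.pyGet? c 1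
    · simp only [if_pos h]
      constructor
      · intro hfalse; cases hfalse
      · intro hall; exact absurd (hall c (by simp) h.2.symm) h.1
    · simp only [if_neg h, ih]
      constructor
      · intro hall c' hc' heq
        rcases List.mem_cons.mp hc' with rfl | hm
        · by_contra hne; exact h ⟨hne, heq.symm⟩
        · exact hall c' hm heq
      · intro hall c' hc' heq; exact hall c' (List.mem_cons_of_mem _ hc') heq

-- single-key transition of B's dict loop
def step1 (o : Option (Option (List String))) (r : List String) : Option (Option (List String)) :=
  match o with
  | none => some (some r)
  | some v => if v ≠ some r then some none else some v

theorem get?_buildGroups_aux (l : List (List String))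
    (g : PySem.Dict String (Option (List String))) (a : String) :
    (l.foldl (fun groups r =>
      match groups.get? (addrOf r) with
      | none => groups.insert (addrOf r) (some r)
      | some v => if v ≠ some r then groups.insert (addrOf r) none else groups) g).get? a
    = (l.filter (fun r => addrOf r = a)).foldl step1 (g.get? a) := by
  induction l generalizing g with
  | nil => simp
  | cons r rest ih =>
    simp only [List.foldl_cons, List.filter_cons]
    by_cases ha : addrOf r = a
    · subst ha
      simp only [decide_true, if_pos, List.foldl_cons]
      cases hg : g.get? (addrOf r) with
      | none =>
        rw [ih, PySem.Dict.get?_insert_self]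
        rfl
      | some v =>
        by_cases hv : v ≠ some r
        · simp only [if_pos hv]
          rw [ih, PySem.Dict.get?_insert_self]
          congr 1
          simp [step1, hv]
        · simp only [if_neg hv]
          rw [ih, hg]
          congr 1
          simp [step1, hv]
    · simp only [ha, decide_false, Bool.false_eq_true, if_neg, not_false_eq_true]
      have hne : a ≠ addrOf r := fun h => ha h.symm
      cases hg : g.get? (addrOf r) with
      | none =>
        rw [ih]
        simp [PySem.Dict.get?_insert_of_ne _ _ hne]
      | some v =>
        by_cases hv : v ≠ some r
        · simp only [if_pos hv]
          rw [ih, PySem.Dict.get?_insert_of_ne _ _ hne]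
        · simp only [if_neg hv]
          exact ih g

theorem step1_stays_none (l : List (List String)) :
    l.foldl step1 (some none) = some none := by
  induction l with
  | nil => rfl
  | cons r rest ih => simpa [step1] using ih

theorem step1_from_some (l : List (List String)) (r0 : List String) :
    l.foldl step1 (some (some r0)) =
      if l.all (fun c => c = r0) then some (some r0) else some none := by
  induction l with
  | nil => simp
  | cons c rest ih =>
    by_cases hc : c = r0
    · simpa [step1, hc] using ih
    · have hs : step1 (some (some r0)) c = some none := by
        simp only [step1, ne_eq, Option.some.injEq]
        rw [if_pos (fun h => hc h.symm)]
      rw [List.foldl_cons, hs, step1_stays_none]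
      simp [hc]

-- B keeps r  ↔  every row sharing r's address equals r (for r in the list)
theorem alt_pred_iff (results : List (List String)) (r : List String) (hr : r ∈ results) :
    ((buildGroups results).getD (addrOf r) none = some r) ↔
      ∀ c ∈ results, addrOf c = addrOf r → c = r := by
  have hget : (buildGroups results).get? (addrOf r)
      = (results.filter (fun c => addrOf c = addrOf r)).foldl step1 none := by
    simpa [buildGroups] using get?_buildGroups_aux results PySem.Dict.empty (addrOf r)
  have hmem : r ∈ results.filter (fun c => addrOf c = addrOf r) := by
    simp [List.mem_filter, hr]
  cases hL : results.filter (fun c => addrOf c = addrOf r) with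
  | nil => simp [hL] at hmem
  | cons r0 rest =>
    rw [hL] at hget
    simp only [List.foldl_cons, step1] at hget
    rw [step1_from_some] at hget
    have hiff : (∀ c ∈ results, addrOf c = addrOf r → c = r) ↔
        (r0 = r ∧ rest.all (fun c => c = r0) = true) := by
      constructor
      · intro hall
        have hr0 : r0 ∈ results.filter (fun c => addrOf c = addrOf r) := by simp [hL]
        have hr0' := List.mem_filter.mp hr0
        have : r0 = r := hall r0 hr0'.1 (by simpa using hr0'.2)
        refine ⟨this, ?_⟩
        simp only [List.all_eq_true, decide_eq_true_eq]
        intro c hc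
        have hcmem : c ∈ results.filter (fun c => addrOf c = addrOf r) := by
          rw [hL]; exact List.mem_cons_of_mem _ hc
        have hc' := List.mem_filter.mp hcmem
        rw [this]; exact hall c hc'.1 (by simpa using hc'.2)
      · rintro ⟨heq, hall⟩ c hc hac
        have hcmem : c ∈ results.filter (fun c => addrOf c = addrOf r) := by
          simp [List.mem_filter, hc, hac]
        rw [hL] at hcmem
        rcases List.mem_cons.mp hcmem with rfl | hm
        · exact heq
        · rw [← heq]; simpa using (List.all_eq_true.mp hall) c hm
    rw [PySem.Dict.getD_eq_get?_getD, hget]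
    by_cases hall : rest.all (fun c => c = r0) = true
    · simp only [if_pos hall]
      constructor
      · intro h; exact hiff.mpr ⟨by simpa using h, hall⟩
      · intro h; simpa using (hiff.mp h).1
    · simp only [if_neg hall]
      constructor
      · intro h; simp at h
      · intro h; exact absurd (hiff.mp h).2 hall

-- under Pre_, equality of r[1] options is equality of addresses
theorem pyGet_eq_iff_addr (r c : List String) (hr : 2 ≤ r.length) (hc : 2 ≤ c.length) :
    (PySem.List.pyGet? c 1 = PySem.List.pyGet? r 1) ↔ addrOf c = addrOf r := by
  have hr' : ∃ vr, PySem.List.pyGet? r 1 = some vr := by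
    cases r with
    | nil => simp at hr
    | cons x rs =>
      cases rs with
      | nil => simp at hr
      | cons y rs' => exact ⟨y, by simp [PySem.List.pyGet?, PySem.List.pyIdx?]⟩
  have hc' : ∃ vc, PySem.List.pyGet? c 1 = some vc := by
    cases c with
    | nil => simp at hc
    | cons x cs =>
      cases cs with
      | nil => simp at hc
      | cons y cs' => exact ⟨y, by simp [PySem.List.pyGet?, PySem.List.pyIdx?]⟩
  obtain ⟨vr, hvr⟩ := hr'
  obtain ⟨vc, hvc⟩ := hc'
  simp [addrOf, hvr, hvc]

-- ===== VERDICT (by name: the statement is the Claim_ definition above) =====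
theorem compareAddress_spec : Claim_equal_compareAddress := by
  intro results _ hpre
  unfold Spec_compareAddress
  rw [compareAddress_eq_filter, compareAddress_alt]
  apply List.filter_congr
  intro r hr
  have h1 := innerA_eq_true_iff r results
  have h2 := alt_pred_iff results r hr
  by_cases hP : ∀ c ∈ results, addrOf c = addrOf r → c = r
  · have hA : innerA r results = true := by
      rw [h1]
      intro c hc heq
      exact hP c hc ((pyGet_eq_iff_addr r c (hpre r hr) (hpre c hc)).mp heq)
    have hB : (buildGroups results).getD (addrOf r) none = some r := h2.mpr hP
    simp [hA, hB]
  · have hA : innerA r results = false := by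
      cases hia : innerA r results with
      | false => rfl
      | true =>
        exact absurd (fun c hc hac =>
          (h1.mp hia) c hc ((pyGet_eq_iff_addr r c (hpre r hr) (hpre c hc)).mpr hac)) hP
    have hB : ¬ ((buildGroups results).getD (addrOf r) none = some r) :=
      fun h => hP (h2.mp h)
    simp [hA, hB]
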